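-- pv_equiv track=rewrite | github.com/sandyz1000/algo_LC_GFG | dynamic_programming/longest_increasing_sub.py | lis_monoqueue
-- ===== SOURCE A (Python) =====
-- from typing import List, Tuple
--
-- def lis_monoqueue(arr: List[int]) -> int:
--     st = []
--     rt = len(arr) - 1
--     lis = 0
--     while rt != -1:
--         while len(st) != 0 and arr[rt] >= st[-1]:
--             lis = max(len(st), lis)
--             st.pop()
--
--         st.append(arr[rt])
--         rt -= 1
--     return max(lis, len(st))
-- ===== SOURCE B (Python) =====
-- def lis_monoqueue(arr):
--     best = 0
--     for i in range(len(arr)):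
--         m = arr[i]
--         c = 1
--         for x in arr[i + 1:]:
--             if x > m:
--                 m = x
--                 c += 1
--         best = max(best, c)
--     return best
-- ===== Notes on version B (the rewrite author's own statement) =====
-- stated objective: alternative
-- what changed: Replaced A's right-to-left monotone-stack sweep (pop-counting stack sizes) by a stack-free nested forward scan: for each start index count the running-maximum records of that suffix and take the max; no stack or pops at all.
import Mathlib
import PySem

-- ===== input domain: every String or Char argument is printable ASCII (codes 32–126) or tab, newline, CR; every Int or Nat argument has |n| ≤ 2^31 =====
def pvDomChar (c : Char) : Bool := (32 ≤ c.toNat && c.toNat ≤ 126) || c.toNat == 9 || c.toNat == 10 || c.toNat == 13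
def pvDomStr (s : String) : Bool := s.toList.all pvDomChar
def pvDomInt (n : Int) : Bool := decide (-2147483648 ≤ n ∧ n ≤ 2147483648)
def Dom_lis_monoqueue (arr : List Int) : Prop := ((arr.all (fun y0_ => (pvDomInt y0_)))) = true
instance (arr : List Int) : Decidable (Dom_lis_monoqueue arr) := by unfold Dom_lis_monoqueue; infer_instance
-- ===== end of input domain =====

-- B replaces A's right-to-left monotone stack by a stack-free nested forward scan
-- (for each start index, count running-maximum records); objective: alternative, same values.

-- ===== PORT A =====
-- inner `while len(st) != 0 and arr[rt] >= st[-1]` loop; stack top = list head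
def lisPop (x : Int) (st : List Int) (lis : Int) : List Int × Int :=
  match st with
  | [] => ([], lis)
  | t :: rest =>
      if x ≥ t then lisPop x rest (max ((((t :: rest).length : Nat) : Int)) lis)
      else (t :: rest, lis)

-- outer `while rt != -1` loop: visits arr[rt] for rt = len-1 … 0, i.e. folds over arr.reverse
def lisOuter : List Int → List Int → Int → List Int × Int
  | [], st, lis => (st, lis)
  | x :: r, st, lis =>
      let p := lisPop x st lis
      lisOuter r (x :: p.1) p.2

def lis_monoqueue (arr : List Int) : Int :=
  let p := lisOuter arr.reverse [] 0
  max p.2 ((p.1.length : Nat) : Int)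

-- ===== PORT B =====
-- `for x in arr[i+1:]: if x > m: m = x; c += 1`
def lisInner (m c : Int) : List Int → Int
  | [] => c
  | x :: xs => if x > m then lisInner x (c + 1) xs else lisInner m c xs

-- `for i in range(len(arr)) … best = max(best, c)`: scan each suffix
def lisBestGo : List Int → Int → Int
  | [], best => best
  | x :: xs, best => lisBestGo xs (max best (lisInner x 1 xs))

def lis_monoqueue_alt (arr : List Int) : Int := lisBestGo arr 0

-- ===== PRECONDITION & SPEC =====
def Spec_lis_monoqueue (arr : List Int) (out : Int) : Prop := out = lis_monoqueue_alt arr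
instance (arr : List Int) (out : Int) : Decidable (Spec_lis_monoqueue arr out) := by unfold Spec_lis_monoqueue; infer_instance

-- ===== CLAIM (what is proved, stated in full; the proofs are below) =====
def Claim_equal_lis_monoqueue : Prop := ∀ (arr : List Int), Dom_lis_monoqueue arr → Spec_lis_monoqueue arr (lis_monoqueue arr)

-- ===== LEMMAS AND PROOFS =====

-- record count of a suffix starting with running max m
def rgo (m : Int) : List Int → Int
  | [] => 0
  | y :: ys => if y > m then 1 + rgo y ys else rgo m ys

-- number of left-to-right strict records of a list
def rcnt : List Int → Int
  | [] => 0
  | x :: s => 1 + rgo x s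

-- max of rcnt over all suffixes
def bestOf : List Int → Int
  | [] => 0
  | x :: s => max (rcnt (x :: s)) (bestOf s)

-- the stack A maintains after processing suffix s (head = top)
def recList : List Int → List Int
  | [] => []
  | x :: s => x :: (recList s).dropWhile (fun t => decide (x ≥ t))

theorem lisInner_eq (xs : List Int) : ∀ (m c : Int), lisInner m c xs = c + rgo m xs := by
  induction xs with
  | nil => intro m c; simp [lisInner, rgo]
  | cons y ys ih =>
      intro m c
      simp only [lisInner, rgo]
      split
      · rw [ih]; ring
      · rw [ih]

theorem bestOf_nonneg (l : List Int) : 0 ≤ bestOf l := by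
  induction l with
  | nil => simp [bestOf]
  | cons x s ih => simp only [bestOf]; exact le_max_of_le_right ih

theorem lisBestGo_eq (l : List Int) : ∀ best, 0 ≤ best → lisBestGo l best = max best (bestOf l) := by
  induction l with
  | nil => intro best hb; simp [lisBestGo, bestOf]; omega
  | cons x xs ih =>
      intro best hb
      simp only [lisBestGo, bestOf]
      rw [ih _ (le_trans hb (le_max_left _ _)), lisInner_eq]
      simp only [rcnt]
      rw [max_assoc]

theorem dropWhile_dropWhile (p q : Int → Bool) (h : ∀ a, p a = true → q a = true) :
    ∀ l : List Int, (l.dropWhile p).dropWhile q = l.dropWhile q := by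
  intro l
  induction l with
  | nil => simp
  | cons a l ih =>
      by_cases hp : p a = true
      · rw [List.dropWhile_cons_of_pos hp, ih, List.dropWhile_cons_of_pos (h a hp)]
      · rw [List.dropWhile_cons_of_neg hp]

theorem rgo_recList (s : List Int) : ∀ m : Int,
    rgo m s = (((recList s).dropWhile (fun t => decide (m ≥ t))).length : Int) := by
  induction s with
  | nil => intro m; simp [rgo, recList]
  | cons y ys ih =>
      intro m
      simp only [rgo, recList]
      by_cases hy : y > m
      · rw [if_pos hy, List.dropWhile_cons_of_neg (by simpa using hy), ih y]
        simp only [List.length_cons]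
        push_cast
        ring
      · rw [if_neg hy, List.dropWhile_cons_of_pos (by simpa using not_lt.mp hy),
            dropWhile_dropWhile _ _ (fun a ha => by
              have h1 : y ≥ a := by simpa using ha
              have h2 : y ≤ m := not_lt.mp hy
              simpa using le_trans h1 h2), ih m]

theorem lisPop_eq (x : Int) : ∀ (st : List Int) (lis : Int),
    lisPop x st lis =
      (st.dropWhile (fun t => decide (x ≥ t)),
       if st.dropWhile (fun t => decide (x ≥ t)) = st then lis
       else max ((st.length : Nat) : Int) lis) := by
  intro st
  induction st with
  | nil => intro lis; simp [lisPop]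
  | cons t rest ih =>
      intro lis
      by_cases hx : x ≥ t
      · have hd : (t :: rest).dropWhile (fun t => decide (x ≥ t))
            = rest.dropWhile (fun t => decide (x ≥ t)) :=
          List.dropWhile_cons_of_pos (by simpa using hx)
        have hne : rest.dropWhile (fun t => decide (x ≥ t)) ≠ t :: rest := by
          intro he
          have := List.length_dropWhile_le (fun t => decide (x ≥ t)) rest
          rw [he] at this
          simp at this
        rw [show lisPop x (t :: rest) lis
              = lisPop x rest (max (((t :: rest).length : Nat) : Int) lis) by
            simp [lisPop, hx], ih, hd]
        have hlen : ((rest.length : Nat) : Int) ≤ max (((t :: rest).length : Nat) : Int) lis := by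
          have : (rest.length : Int) ≤ ((t :: rest).length : Int) := by simp
          exact le_trans this (le_max_left _ _)
        by_cases hr : rest.dropWhile (fun t => decide (x ≥ t)) = rest
        · simp [hr]
        · simp only [hr, if_false, hne, if_false]
          congr 1
          exact max_eq_right hlen
      · have hd : (t :: rest).dropWhile (fun t => decide (x ≥ t)) = t :: rest :=
          List.dropWhile_cons_of_neg (by simpa using hx)
        simp [lisPop, hx, hd]

theorem lisOuter_inv (r : List Int) : ∀ (s : List Int) (lis : Int),
    max lis (((recList s).length : Nat) : Int) = bestOf s →
    (let p := lisOuter r (recList s) lis; max p.2 ((p.1.length : Nat) : Int))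
      = bestOf (r.reverse ++ s) := by
  induction r with
  | nil => intro s lis h; simpa using h
  | cons x r ih =>
      intro s lis h
      have hstep : lisOuter (x :: r) (recList s) lis
          = lisOuter r (recList (x :: s))
              (if (recList s).dropWhile (fun t => decide (x ≥ t)) = recList s then lis
               else max (((recList s).length : Nat) : Int) lis) := by
        simp only [lisOuter, lisPop_eq]
        rfl
      rw [hstep]
      have hrev : (x :: r).reverse ++ s = r.reverse ++ (x :: s) := by
        simp
      rw [hrev]
      apply ih (x :: s)
      -- new stack length = rcnt (x :: s)
      have hlen : (((recList (x :: s)).length : Nat) : Int) = rcnt (x :: s) := by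
        simp only [recList, rcnt, rgo_recList, List.length_cons]
        push_cast
        ring
      have hbest : bestOf (x :: s) = max (rcnt (x :: s)) (bestOf s) := rfl
      set L : Int := (((recList s).length : Nat) : Int) with hL
      by_cases hp : (recList s).dropWhile (fun t => decide (x ≥ t)) = recList s
      · -- no pop: new length = 1 + L
        have h1 : (((recList (x :: s)).length : Nat) : Int) = 1 + L := by
          simp only [recList, hp, List.length_cons, hL]
          push_cast
          ring
        have h2 : rcnt (x :: s) = 1 + L := by rw [← hlen, h1]
        rw [if_pos hp, hlen, hbest, ← h, h2]
        omega
      · rw [if_neg hp, hlen, hbest, ← h]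
        omega

theorem lis_monoqueue_eq_bestOf (arr : List Int) : lis_monoqueue arr = bestOf arr := by
  have h := lisOuter_inv arr.reverse [] 0 (by simp [recList, bestOf])
  simp only [recList, List.reverse_reverse, List.append_nil] at h
  simpa [lis_monoqueue] using h

theorem lis_monoqueue_alt_eq_bestOf (arr : List Int) : lis_monoqueue_alt arr = bestOf arr := by
  rw [lis_monoqueue_alt, lisBestGo_eq arr 0 le_rfl]
  exact max_eq_right (bestOf_nonneg arr)

-- ===== VERDICT (by name: the statement is the Claim_ definition above) =====
theorem lis_monoqueue_spec : Claim_equal_lis_monoqueue := by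
  intro arr _
  unfold Spec_lis_monoqueue
  rw [lis_monoqueue_eq_bestOf, lis_monoqueue_alt_eq_bestOf]
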